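-- pv_equiv track=rewrite | github.com/yibibibibi/Tumor-contour-extraction-using-GA | mesh.py | rightgrid
-- ===== SOURCE A (Python) =====
-- def rightgrid(exmap, exrange):
--     correctgrid = {}
--     for key in exmap:
--         if len(exmap[key]) == 1:
--             correctgrid[key] = [0 for i in range(3)]
--             correctgrid[key][0] = [exrange[key][0], exmap[key][0][0], 2]
--             correctgrid[key][1] = [exmap[key][0][0], exmap[key][0][1], 3]
--             correctgrid[key][-1] = [exmap[key][0][1], exrange[key][1], 2]
--         else:
--             correctgrid[key] = [0 for i in range(len(exmap[key] * 2) + 1)]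
--             correctgrid[key][0] = [exrange[key][0], exmap[key][0][0], 2]
--             correctgrid[key][-1] = [exmap[key][-1][1], exrange[key][1], 2]
--             for i in range(len(exmap[key]) - 1):
--                 correctgrid[key][i * 2 + 1] = [exmap[key][i][0], exmap[key][i][1], 3]
--                 correctgrid[key][i * 2 + 2] = [exmap[key][i][1], exmap[key][i + 1][0], 2]
--             correctgrid[key][-2] = [exmap[key][-1][0], exmap[key][-1][1], 3]
--     return correctgrid
-- ===== SOURCE B (Python) =====
-- def rightgrid(exmap, exrange):
--     correctgrid = {}
--     for key, ivs in exmap.items():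
--         pts = [exrange[key][0]]
--         for iv in ivs:
--             pts.append(iv[0])
--             pts.append(iv[1])
--         pts.append(exrange[key][1])
--         correctgrid[key] = [[pts[j], pts[j + 1], 3 if j % 2 else 2]
--                             for j in range(len(pts) - 1)]
--     return correctgrid
-- ===== Notes on version B (the rewrite author's own statement) =====
-- stated objective: simpler
-- what changed: A preallocates a placeholder list of 2n+1 slots and assigns interval entries at computed positions (0, -1, i*2+1, i*2+2, -2) with a special case for a single interval; B instead flattens each key's boundary points into one flat pts list and builds the grid by pairing adjacent points with alternating type, no index assignments and no special case.
import Mathlib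
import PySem

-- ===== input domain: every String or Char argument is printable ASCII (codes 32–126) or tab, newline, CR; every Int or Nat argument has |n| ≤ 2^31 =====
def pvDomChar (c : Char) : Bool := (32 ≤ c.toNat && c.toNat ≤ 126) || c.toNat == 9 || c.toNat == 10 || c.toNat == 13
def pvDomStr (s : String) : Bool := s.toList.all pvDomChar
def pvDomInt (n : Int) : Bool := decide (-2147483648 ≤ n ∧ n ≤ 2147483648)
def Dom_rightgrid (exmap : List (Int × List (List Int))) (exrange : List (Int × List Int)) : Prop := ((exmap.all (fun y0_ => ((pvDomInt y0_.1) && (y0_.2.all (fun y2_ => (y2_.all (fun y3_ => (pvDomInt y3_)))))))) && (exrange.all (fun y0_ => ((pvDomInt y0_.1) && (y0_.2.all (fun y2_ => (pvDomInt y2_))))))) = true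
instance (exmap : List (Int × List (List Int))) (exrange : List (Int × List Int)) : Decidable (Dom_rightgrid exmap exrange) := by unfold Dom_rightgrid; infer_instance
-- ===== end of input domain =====

-- B replaces A's preallocate-and-assign grid construction (with its len==1 special case) by
-- flattening each key's boundary points into one list and pairing adjacent points; objective: simpler.


-- ===== PORT A =====
-- the body of A's per-key loop, step for step (Python's placeholder int 0 is typed as
-- [] : List Int; under Pre_ every placeholder slot is overwritten before the dict is returned)
def rightgrid_grid (m : List (List Int)) (rng : List Int) : List (List Int) :=
  if PySem.List.len m == 1 then
    let g := (PySem.List.pyRange 0 3 1).map (fun _ => ([] : List Int))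
    let g := PySem.List.pySetD g 0 [PySem.List.pyGetD rng 0 0, PySem.List.pyGetD (PySem.List.pyGetD m 0 []) 0 0, 2]
    let g := PySem.List.pySetD g 1 [PySem.List.pyGetD (PySem.List.pyGetD m 0 []) 0 0, PySem.List.pyGetD (PySem.List.pyGetD m 0 []) 1 0, 3]
    let g := PySem.List.pySetD g (-1) [PySem.List.pyGetD (PySem.List.pyGetD m 0 []) 1 0, PySem.List.pyGetD rng 1 0, 2]
    g
  else
    let g := (PySem.List.pyRange 0 (PySem.List.len (m ++ m) + 1) 1).map (fun _ => ([] : List Int))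
    let g := PySem.List.pySetD g 0 [PySem.List.pyGetD rng 0 0, PySem.List.pyGetD (PySem.List.pyGetD m 0 []) 0 0, 2]
    let g := PySem.List.pySetD g (-1) [PySem.List.pyGetD (PySem.List.pyGetD m (-1) []) 1 0, PySem.List.pyGetD rng 1 0, 2]
    let g := (PySem.List.pyRange 0 (PySem.List.len m - 1) 1).foldl (fun g i =>
        let g := PySem.List.pySetD g (i * 2 + 1) [PySem.List.pyGetD (PySem.List.pyGetD m i []) 0 0, PySem.List.pyGetD (PySem.List.pyGetD m i []) 1 0, 3]
        PySem.List.pySetD g (i * 2 + 2) [PySem.List.pyGetD (PySem.List.pyGetD m i []) 1 0, PySem.List.pyGetD (PySem.List.pyGetD m (i + 1) []) 0 0, 2]) g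
    let g := PySem.List.pySetD g (-2) [PySem.List.pyGetD (PySem.List.pyGetD m (-1) []) 0 0, PySem.List.pyGetD (PySem.List.pyGetD m (-1) []) 1 0, 3]
    g

def rightgrid (exmap : List (Int × List (List Int))) (exrange : List (Int × List Int)) : List (Int × List (List Int)) :=
  let dm := PySem.Dict.ofList exmap
  let dr := PySem.Dict.ofList exrange
  (dm.keys.foldl (fun (cg : PySem.Dict Int (List (List Int))) key =>
      cg.insert key (rightgrid_grid (dm.getD key []) (dr.getD key []))) PySem.Dict.empty).items

-- ===== PORT B =====
-- B's per-key body: flatten the boundary points into pts, then pair adjacent points with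
-- alternating type (2 outside the intervals, 3 inside)
def rightgrid_alt_grid (ivs : List (List Int)) (rng : List Int) : List (List Int) :=
  let pts := [PySem.List.pyGetD rng 0 0]
  let pts := ivs.foldl (fun pts iv => pts ++ [PySem.List.pyGetD iv 0 0, PySem.List.pyGetD iv 1 0]) pts
  let pts := pts ++ [PySem.List.pyGetD rng 1 0]
  (PySem.List.pyRange 0 (PySem.List.len pts - 1) 1).map (fun j =>
    [PySem.List.pyGetD pts j 0, PySem.List.pyGetD pts (j + 1) 0,
     if PySem.Int.mod j 2 == 0 then 2 else 3])

def rightgrid_alt (exmap : List (Int × List (List Int))) (exrange : List (Int × List Int)) : List (Int × List (List Int)) :=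
  let dm := PySem.Dict.ofList exmap
  let dr := PySem.Dict.ofList exrange
  (dm.items.foldl (fun (cg : PySem.Dict Int (List (List Int))) kv =>
      cg.insert kv.1 (rightgrid_alt_grid kv.2 (dr.getD kv.1 []))) PySem.Dict.empty).items

-- ===== PRECONDITION & SPEC =====
-- Pre_ = exactly the inputs on which Python A returns: every key's interval list is nonempty
-- (else IndexError), every interval has both endpoints (else IndexError), and the key is in
-- exrange with both range endpoints present (else KeyError/IndexError).
def Pre_rightgrid (exmap : List (Int × List (List Int))) (exrange : List (Int × List Int)) : Prop :=
  ∀ p ∈ (PySem.Dict.ofList exmap).items,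
    p.2 ≠ [] ∧ (∀ iv ∈ p.2, 2 ≤ iv.length) ∧
    ∃ q ∈ (PySem.Dict.ofList exrange).items, q.1 = p.1 ∧ 2 ≤ q.2.length
instance (exmap : List (Int × List (List Int))) (exrange : List (Int × List Int)) : Decidable (Pre_rightgrid exmap exrange) := by unfold Pre_rightgrid; infer_instance
def pvWitness_rightgrid : (List (Int × List (List Int))) × (List (Int × List Int)) :=
  ([(0, [[1, 2]]), (1, [[1, 2], [4, 6]])], [(0, [0, 10]), (1, [0, 10])])

def Spec_rightgrid (exmap : List (Int × List (List Int))) (exrange : List (Int × List Int)) (out : List (Int × List (List Int))) : Prop := out = rightgrid_alt exmap exrange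
instance (exmap : List (Int × List (List Int))) (exrange : List (Int × List Int)) (out : List (Int × List (List Int))) : Decidable (Spec_rightgrid exmap exrange out) := by unfold Spec_rightgrid; infer_instance

-- ===== CLAIM (what is proved, stated in full; the proofs are below) =====
def Claim_equal_rightgrid : Prop := ∀ (exmap : List (Int × List (List Int))) (exrange : List (Int × List Int)), Dom_rightgrid exmap exrange → Pre_rightgrid exmap exrange → Spec_rightgrid exmap exrange (rightgrid exmap exrange)

-- ===== LEMMAS AND PROOFS =====

-- pySetD on a Python index expressed through List.set
lemma pySetD_zero {α : Type} (xs : List α) (v : α) :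
    PySem.List.pySetD xs 0 v = xs.set 0 v := by
  cases xs <;> simp [PySem.List.pySetD, PySem.List.pySet?, PySem.List.pyIdx?]

lemma pySetD_neg_one {α : Type} (xs : List α) (v : α) :
    PySem.List.pySetD xs (-1) v = xs.set (xs.length - 1) v := by
  rcases xs with _ | ⟨x, xs⟩
  · simp [PySem.List.pySetD, PySem.List.pySet?, PySem.List.pyIdx?]
  · simp only [PySem.List.pySetD, PySem.List.pySet?, PySem.List.pyIdx?]
    rw [if_neg (by omega), if_pos (by simp only [List.length_cons]; push_cast; omega)]
    simp

lemma pySetD_neg_two {α : Type} (xs : List α) (v : α) (h : 2 ≤ xs.length) :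
    PySem.List.pySetD xs (-2) v = xs.set (xs.length - 2) v := by
  simp only [PySem.List.pySetD, PySem.List.pySet?, PySem.List.pyIdx?]
  rw [if_neg (by omega), if_pos (by omega)]
  simp

lemma getLast_eq_getD {α : Type} (xs : List α) (h : xs ≠ []) (d : α) :
    xs.getLast h = xs.getD (xs.length - 1) d := by
  have h0 : 0 < xs.length := List.length_pos_of_ne_nil h
  rw [List.getLast_eq_getElem, List.getD_eq_getElem?_getD,
    List.getElem?_eq_getElem (by omega)]
  rfl

-- length of A's assignment loop result
lemma loop_length (vA vB : Nat → List Int) (t : Nat) (g : List (List Int)) :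
    ((List.range t).foldl (fun g i => (g.set (2 * i + 1) (vA i)).set (2 * i + 2) (vB i)) g).length
      = g.length := by
  induction t with
  | zero => simp
  | succ t ih => rw [List.range_succ, List.foldl_append]; simp [ih]

-- A's interior-assignment loop, characterised pointwise
lemma loop_get? (vA vB : Nat → List Int) (t : Nat) (g : List (List Int)) (ht : 2 * t < g.length) (j : Nat) :
    ((List.range t).foldl (fun g i => (g.set (2 * i + 1) (vA i)).set (2 * i + 2) (vB i)) g)[j]?
      = if 1 ≤ j ∧ j ≤ 2 * t then
          some (if j % 2 = 1 then vA ((j - 1) / 2) else vB ((j - 2) / 2))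
        else g[j]? := by
  induction t with
  | zero => simp; omega
  | succ t ih =>
    rw [List.range_succ, List.foldl_append]
    simp only [List.foldl_cons, List.foldl_nil]
    have hlen := loop_length vA vB t g
    have ih' := ih (by omega)
    rw [List.getElem?_set, List.getElem?_set]
    simp only [List.length_set, hlen]
    by_cases hj1 : j = 2 * t + 1
    · rw [if_neg (show ¬(2 * t + 2 = j) by omega), if_pos (show 2 * t + 1 = j by omega),
        if_pos (show 2 * t + 1 < g.length by omega),
        if_pos (show 1 ≤ j ∧ j ≤ 2 * (t + 1) by omega),
        if_pos (show j % 2 = 1 by omega),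
        show (j - 1) / 2 = t by omega]
    · by_cases hj2 : j = 2 * t + 2
      · rw [if_pos (show 2 * t + 2 = j by omega),
          if_pos (show 2 * t + 2 < g.length by omega),
          if_pos (show 1 ≤ j ∧ j ≤ 2 * (t + 1) by omega),
          if_neg (show ¬(j % 2 = 1) by omega),
          show (j - 2) / 2 = t by omega]
      · rw [if_neg (show ¬(2 * t + 2 = j) by omega), if_neg (show ¬(2 * t + 1 = j) by omega), ih']
        by_cases h3 : 1 ≤ j ∧ j ≤ 2 * t
        · rw [if_pos h3, if_pos (show 1 ≤ j ∧ j ≤ 2 * (t + 1) by omega)]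
        · rw [if_neg h3, if_neg (show ¬(1 ≤ j ∧ j ≤ 2 * (t + 1)) by omega)]

-- A's per-key grid, normalised to Nat-indexed List.set form
lemma Agrid_norm (m : List (List Int)) (rng : List Int) (hn : 2 ≤ m.length) :
    rightgrid_grid m rng =
      (((List.range (m.length - 1)).foldl
          (fun g k => (g.set (2 * k + 1) [(m.getD k []).getD 0 0, PySem.List.pyGetD (m.getD k []) 1 0, 3]).set
            (2 * k + 2) [PySem.List.pyGetD (m.getD k []) 1 0, (m.getD (k + 1) []).getD 0 0, 2])
          (((List.replicate (2 * m.length + 1) ([] : List Int)).set 0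
              [rng.getD 0 0, (m.getD 0 []).getD 0 0, 2]).set
            (2 * m.length) [PySem.List.pyGetD (m.getD (m.length - 1) []) 1 0, PySem.List.pyGetD rng 1 0, 2]))).set
        (2 * m.length - 1)
        [(m.getD (m.length - 1) []).getD 0 0, PySem.List.pyGetD (m.getD (m.length - 1) []) 1 0, 3] := by
  have hm : m ≠ [] := by intro h; rw [h] at hn; simp at hn
  have hrange : PySem.List.len (m ++ m) + 1 = ((2 * m.length + 1 : Nat) : Int) := by
    simp [PySem.List.len_eq]; ring
  have hrep : List.map ((fun _ => ([] : List Int)) ∘ fun (k : Nat) => (↑k : Int)) (List.range (2 * m.length + 1))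
      = List.replicate (2 * m.length + 1) [] := by
    simp [Function.comp_def, List.map_const']
  have hlen1 : PySem.List.len m - 1 = ((m.length - 1 : Nat) : Int) := by
    simp [PySem.List.len_eq]; omega
  unfold rightgrid_grid
  rw [if_neg (by simp [PySem.List.len_eq]; omega)]
  dsimp only
  rw [hrange, PySem.List.pyRange_zero_natCast, List.map_map, hrep]
  rw [pySetD_zero]
  rw [PySem.List.pyGetD_neg_one m [] hm, getLast_eq_getD m hm []]
  rw [pySetD_neg_one]
  simp only [List.length_set, List.length_replicate]
  rw [show 2 * m.length + 1 - 1 = 2 * m.length by omega]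
  rw [hlen1, PySem.List.pyRange_zero_natCast, List.foldl_map]
  rw [PySem.List.foldl_congr_mem _ _
    (fun g k => (g.set (2 * k + 1) [(m.getD k []).getD 0 0, PySem.List.pyGetD (m.getD k []) 1 0, 3]).set
            (2 * k + 2) [PySem.List.pyGetD (m.getD k []) 1 0, (m.getD (k + 1) []).getD 0 0, 2]) _
    (by
      intro acc k _
      rw [show ((k : Int) * 2 + 1) = ((2 * k + 1 : Nat) : Int) by push_cast; ring,
        show ((k : Int) * 2 + 2) = ((2 * k + 2 : Nat) : Int) by push_cast; ring,
        show ((k : Int) + 1) = ((k + 1 : Nat) : Int) by push_cast; rfl]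
      simp only [PySem.List.pySetD_natCast, PySem.List.pyGetD_natCast, PySem.List.pyGetD_zero])]
  rw [pySetD_neg_two _ _ (by rw [loop_length]; simp; omega)]
  rw [loop_length]
  simp only [List.length_set, List.length_replicate]
  rw [show 2 * m.length + 1 - 2 = 2 * m.length - 1 by omega]
  simp only [PySem.List.pyGetD_zero]

-- the flattened interior points of B's pts list
def flatPts (m : List (List Int)) : List Int :=
  m.flatMap (fun iv => [PySem.List.pyGetD iv 0 0, PySem.List.pyGetD iv 1 0])

lemma flatPts_length (m : List (List Int)) : (flatPts m).length = 2 * m.length := by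
  induction m with
  | nil => simp [flatPts]
  | cons iv m ih => simp [flatPts] at ih ⊢; omega

-- B's per-key grid, normalised to a map over Nat range indexing into pts
lemma Bgrid_norm (m : List (List Int)) (rng : List Int) :
    rightgrid_alt_grid m rng =
      (List.range (2 * m.length + 1)).map (fun j =>
        [ (PySem.List.pyGetD rng 0 0 :: (flatPts m ++ [PySem.List.pyGetD rng 1 0])).getD j 0,
          (PySem.List.pyGetD rng 0 0 :: (flatPts m ++ [PySem.List.pyGetD rng 1 0])).getD (j + 1) 0,
          if PySem.Int.mod (↑j) 2 == 0 then 2 else 3 ]) := by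
  unfold rightgrid_alt_grid
  dsimp only
  rw [PySem.List.foldl_append_eq_flatMap]
  rw [show (List.flatMap (fun iv => [PySem.List.pyGetD iv 0 0, PySem.List.pyGetD iv 1 0]) m) = flatPts m from rfl]
  simp only [List.cons_append, List.nil_append]
  have hlen : PySem.List.len (PySem.List.pyGetD rng 0 0 :: (flatPts m ++ [PySem.List.pyGetD rng 1 0])) - 1
      = ((2 * m.length + 1 : Nat) : Int) := by
    simp [PySem.List.len_eq, flatPts_length]
  rw [hlen, PySem.List.pyRange_zero_natCast, List.map_map]
  apply List.map_congr_left
  intro j hj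
  simp only [Function.comp_apply]
  rw [show ((j : Int) + 1) = ((j + 1 : Nat) : Int) by push_cast; rfl]
  simp only [PySem.List.pyGetD_natCast]

lemma flatPts_get? (m : List (List Int)) (k : Nat) (hk : k < 2 * m.length) :
    (flatPts m)[k]? = some (if k % 2 = 0 then PySem.List.pyGetD (m.getD (k / 2) []) 0 0
                            else PySem.List.pyGetD (m.getD (k / 2) []) 1 0) := by
  induction m generalizing k with
  | nil => simp at hk
  | cons iv m ih =>
    match k with
    | 0 => simp [flatPts]
    | 1 => simp [flatPts]
    | (k + 2) =>
      have h2 : k < 2 * m.length := by simp at hk; omega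
      have := ih k h2
      simp [flatPts] at this ⊢
      exact this

lemma pts_getD (m : List (List Int)) (r0 r1 : Int) (j : Nat) (hj : 1 ≤ j) (hj2 : j ≤ 2 * m.length) :
    (r0 :: (flatPts m ++ [r1])).getD j 0 =
      (if (j - 1) % 2 = 0 then (m.getD ((j - 1) / 2) []).getD 0 0
       else PySem.List.pyGetD (m.getD ((j - 1) / 2) []) 1 0) := by
  obtain ⟨j', rfl⟩ : ∃ j', j = j' + 1 := ⟨j - 1, by omega⟩
  rw [List.getD_eq_getElem?_getD, List.getElem?_cons_succ,
    List.getElem?_append_left (by rw [flatPts_length]; omega),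
    flatPts_get? m j' (by omega)]
  simp [PySem.List.pyGetD_zero]

lemma pts_getD_last (m : List (List Int)) (r0 r1 : Int) :
    (r0 :: (flatPts m ++ [r1])).getD (2 * m.length + 1) 0 = r1 := by
  rw [List.getD_eq_getElem?_getD, List.getElem?_cons_succ,
    List.getElem?_append_right (by rw [flatPts_length])]
  simp [flatPts_length]

lemma mod_cast_two (j : Nat) : PySem.Int.mod (↑j) 2 = ((j % 2 : Nat) : Int) := by
  exact_mod_cast PySem.Int.mod_natCast j 2

-- the heart of the equivalence: both per-key grids agree for a nonempty interval list
lemma grid_eq (m : List (List Int)) (rng : List Int) (hm : m ≠ []) :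
    rightgrid_grid m rng = rightgrid_alt_grid m rng := by
  by_cases hn1 : m.length = 1
  · rcases m with _ | ⟨iv, rest⟩
    · exact absurd rfl hm
    · have hr : rest = [] := by simpa using hn1
      subst hr
      have hA : rightgrid_grid [iv] rng = [[PySem.List.pyGetD rng 0 0, PySem.List.pyGetD iv 0 0, 2],
          [PySem.List.pyGetD iv 0 0, PySem.List.pyGetD iv 1 0, 3],
          [PySem.List.pyGetD iv 1 0, PySem.List.pyGetD rng 1 0, 2]] := by rfl
      have hB : rightgrid_alt_grid [iv] rng = [[PySem.List.pyGetD rng 0 0, PySem.List.pyGetD iv 0 0, 2],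
          [PySem.List.pyGetD iv 0 0, PySem.List.pyGetD iv 1 0, 3],
          [PySem.List.pyGetD iv 1 0, PySem.List.pyGetD rng 1 0, 2]] := by
        simp only [rightgrid_alt_grid, List.foldl_cons, List.foldl_nil]
        rw [show (PySem.List.len ([PySem.List.pyGetD rng 0 0] ++ [PySem.List.pyGetD iv 0 0, PySem.List.pyGetD iv 1 0] ++ [PySem.List.pyGetD rng 1 0]) - 1) = 3 by simp [PySem.List.len_eq]]
        rfl
      rw [hA, hB]
  · have hn : 2 ≤ m.length := by
      have := List.length_pos_of_ne_nil hm; omega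
    rw [Agrid_norm m rng hn, Bgrid_norm m rng]
    apply List.ext_getElem?
    intro j
    rw [List.getElem?_set]
    rw [loop_length]
    simp only [List.length_set, List.length_replicate]
    rw [List.getElem?_map]
    by_cases hbig : 2 * m.length + 1 ≤ j
    · rw [if_neg (show ¬(2 * m.length - 1 = j) by omega),
        loop_get? _ _ _ _ (by simp only [List.length_set, List.length_replicate]; omega) j,
        if_neg (show ¬(1 ≤ j ∧ j ≤ 2 * (m.length - 1)) by omega),
        List.getElem?_set, List.getElem?_set]
      simp only [List.length_set, List.length_replicate]
      rw [if_neg (show ¬(2 * m.length = j) by omega),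
        if_neg (show ¬(0 = j) by omega)]
      rw [List.getElem?_eq_none (by rw [List.length_replicate]; omega)]
      rw [List.getElem?_eq_none (by rw [List.length_range]; omega)]
      rfl
    · rw [List.getElem?_range (show j < 2 * m.length + 1 by omega)]
      simp only [Option.map_some]
      by_cases hj0 : j = 0
      · subst hj0
        rw [if_neg (show ¬(2 * m.length - 1 = 0) by omega),
          loop_get? _ _ _ _ (by simp only [List.length_set, List.length_replicate]; omega) 0,
          if_neg (show ¬(1 ≤ 0 ∧ 0 ≤ 2 * (m.length - 1)) by omega),
          List.getElem?_set, List.getElem?_set]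
        simp only [List.length_set, List.length_replicate]
        rw [if_pos True.intro,
          if_pos (show (0 : Nat) < 2 * m.length + 1 by omega)]
        rw [show (0 : Nat) + 1 = 1 from rfl,
          pts_getD m _ _ 1 (by omega) (by omega)]
        rw [mod_cast_two]
        norm_num [PySem.List.pyGetD_zero]
        exact fun h => absurd h hm
      · by_cases hj2n : j = 2 * m.length
        · rw [if_neg (show ¬(2 * m.length - 1 = j) by omega),
            loop_get? _ _ _ _ (by simp only [List.length_set, List.length_replicate]; omega) j,
            if_neg (show ¬(1 ≤ j ∧ j ≤ 2 * (m.length - 1)) by omega),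
            List.getElem?_set, List.getElem?_set]
          simp only [List.length_set, List.length_replicate]
          rw [if_pos (show 2 * m.length = j by omega),
            if_pos (show 2 * m.length < 2 * m.length + 1 by omega)]
          rw [pts_getD m _ _ j (by omega) (by omega),
            show j + 1 = 2 * m.length + 1 by omega, pts_getD_last m,
            mod_cast_two]
          rw [if_neg (show ¬((j - 1) % 2 = 0) by omega),
            show (j - 1) / 2 = m.length - 1 by omega,
            show j % 2 = 0 by omega]
          norm_num [PySem.List.pyGetD_zero]
        · by_cases hjlast : j = 2 * m.length - 1
          · rw [if_pos (show 2 * m.length - 1 = j by omega),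
              if_pos (show 2 * m.length - 1 < 2 * m.length + 1 by omega)]
            rw [pts_getD m _ _ j (by omega) (by omega),
              pts_getD m _ _ (j + 1) (by omega) (by omega),
              mod_cast_two]
            rw [if_pos (show (j - 1) % 2 = 0 by omega),
              show (j - 1) / 2 = m.length - 1 by omega,
              if_neg (show ¬((j + 1 - 1) % 2 = 0) by omega),
              show (j + 1 - 1) / 2 = m.length - 1 by omega,
              show j % 2 = 1 by omega]
            norm_num [PySem.List.pyGetD_zero]
          · have hmid : 1 ≤ j ∧ j ≤ 2 * (m.length - 1) := by omega
            rw [if_neg (show ¬(2 * m.length - 1 = j) by omega),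
              loop_get? _ _ _ _ (by simp only [List.length_set, List.length_replicate]; omega) j,
              if_pos hmid]
            rw [pts_getD m _ _ j (by omega) (by omega),
              pts_getD m _ _ (j + 1) (by omega) (by omega),
              mod_cast_two]
            by_cases hpar : j % 2 = 1
            · rw [if_pos hpar,
                if_pos (show (j - 1) % 2 = 0 by omega),
                if_neg (show ¬((j + 1 - 1) % 2 = 0) by omega),
                show (j + 1 - 1) / 2 = (j - 1) / 2 by omega, hpar]
              norm_num [PySem.List.pyGetD_zero]
            · rw [if_neg hpar,
                if_neg (show ¬((j - 1) % 2 = 0) by omega),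
                if_pos (show (j + 1 - 1) % 2 = 0 by omega),
                show (j - 1) / 2 = (j - 2) / 2 by omega,
                show (j + 1 - 1) / 2 = (j - 2) / 2 + 1 by omega,
                show j % 2 = 0 by omega]
              norm_num [PySem.List.pyGetD_zero]

-- lift the per-key equality through the dict-building folds
lemma rightgrid_eq (exmap : List (Int × List (List Int))) (exrange : List (Int × List Int))
    (h : Pre_rightgrid exmap exrange) : rightgrid exmap exrange = rightgrid_alt exmap exrange := by
  unfold rightgrid rightgrid_alt
  dsimp only
  have hnd : (PySem.Dict.ofList exmap).keys.Nodup := PySem.Dict.nodup_keys_ofList exmap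
  rw [PySem.Dict.items_eq_map_keys (PySem.Dict.ofList exmap) hnd ([] : List (List Int)),
    List.foldl_map]
  congr 1
  apply PySem.List.foldl_congr_mem
  intro cg key hkey
  have hmem : (key, (PySem.Dict.ofList exmap).getD key []) ∈ (PySem.Dict.ofList exmap).items := by
    rw [PySem.Dict.items_eq_map_keys (PySem.Dict.ofList exmap) hnd ([] : List (List Int))]
    exact List.mem_map_of_mem hkey
  have hp := h _ hmem
  rw [grid_eq _ _ hp.1]

-- ===== VERDICT (by name: the statement is the Claim_ definition above) =====
theorem rightgrid_spec : Claim_equal_rightgrid := by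
  intro exmap exrange _ hpre
  exact rightgrid_eq exmap exrange hpre
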